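-- pv_equiv track=rewrite | github.com/SakshamAhlawat/indusnlp-v2 | filters/textcleaner.py | remove_line_and_above
-- ===== SOURCE A (Python) =====
-- def remove_line_and_above(text, keywords):
--     """Remove a line and all lines above it if it contains a keyword."""
--     lines = text.split("\n")
--     for keyword in keywords:
--         to_remove = set()
--         for i, line in enumerate(lines):
--             if keyword in line:
--                 if i > 0:
--                     to_remove.update(range(0, i + 1))
--                 else:
--                     to_remove.add(i)
--         lines = [line for idx, line in enumerate(lines) if idx not in to_remove]
--     return "\n".join(lines)
-- ===== SOURCE B (Python) =====
-- def remove_line_and_above(text, keywords):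
--     """Remove a line and all lines above it if it contains a keyword."""
--     lines = text.split("\n")
--     for keyword in keywords:
--         for back, line in enumerate(reversed(lines)):
--             if keyword in line:
--                 lines = lines[len(lines) - back:]
--                 break
--     return "\n".join(lines)
-- ===== Notes on version B (the rewrite author's own statement) =====
-- stated objective: simpler
-- what changed: Per keyword, instead of accumulating a removal-index set over a forward enumerate and then index-filtering with a comprehension, B scans the lines from the end, finds the first (i.e. last) matching line and keeps the suffix after it by slicing; no set and no filtering pass.
import Mathlib
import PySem

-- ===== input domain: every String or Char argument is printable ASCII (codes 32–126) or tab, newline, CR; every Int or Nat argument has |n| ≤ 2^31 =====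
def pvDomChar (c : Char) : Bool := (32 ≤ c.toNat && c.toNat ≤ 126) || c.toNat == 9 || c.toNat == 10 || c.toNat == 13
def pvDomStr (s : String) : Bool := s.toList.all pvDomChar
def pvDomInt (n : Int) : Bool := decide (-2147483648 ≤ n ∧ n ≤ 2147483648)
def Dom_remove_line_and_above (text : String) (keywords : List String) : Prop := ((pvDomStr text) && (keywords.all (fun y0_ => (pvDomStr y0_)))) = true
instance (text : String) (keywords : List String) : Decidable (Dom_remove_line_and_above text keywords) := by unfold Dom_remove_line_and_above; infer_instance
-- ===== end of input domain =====

-- B replaces A's per-keyword removal-index set + index-filter comprehension by a single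
-- backward scan for the last matching line followed by one suffix slice (objective: simpler).

-- ===== PORT A =====
-- loop body of A's outer 'for keyword in keywords' (removal set, then index filter)
def pvStepA (lines : List String) (keyword : String) : List String :=
  let to_remove : PySem.Set Int :=
    (PySem.List.enumerate lines).foldl (fun s p =>
      if PySem.Str.isIn keyword p.2 then
        if p.1 > 0 then s.update (PySem.List.pyRange 0 (p.1 + 1))
        else s.add p.1
      else s) PySem.Set.empty
  (PySem.List.enumerate lines).foldl (fun acc p =>
    if to_remove.contains p.1 then acc else acc ++ [p.2]) []

def remove_line_and_above (text : String) (keywords : List String) : String :=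
  let lines := (PySem.Str.split? text "\n").getD []
  PySem.Str.join "\n" (keywords.foldl pvStepA lines)

-- ===== PORT B =====
-- 'for back, line in enumerate(reversed(lines)): if keyword in line: break' — index of the
-- first match while walking the reversed list
def pvFirstMatch (keyword : String) : List String → Option Nat
  | [] => none
  | l :: ls =>
      if PySem.Str.isIn keyword l then some 0
      else (pvFirstMatch keyword ls).map (· + 1)

-- loop body of B's outer loop: keep the suffix after the last matching line
def pvStepB (lines : List String) (keyword : String) : List String :=
  match pvFirstMatch keyword lines.reverse with
  | none => lines
  | some back => lines.drop (lines.length - back)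

def remove_line_and_above_alt (text : String) (keywords : List String) : String :=
  let lines := (PySem.Str.split? text "\n").getD []
  PySem.Str.join "\n" (keywords.foldl pvStepB lines)

-- ===== PRECONDITION & SPEC =====
def Spec_remove_line_and_above (text : String) (keywords : List String) (out : String) : Prop := out = remove_line_and_above_alt text keywords
instance (text : String) (keywords : List String) (out : String) : Decidable (Spec_remove_line_and_above text keywords out) := by unfold Spec_remove_line_and_above; infer_instance

-- ===== CLAIM (what is proved, stated in full; the proofs are below) =====
def Claim_equal_remove_line_and_above : Prop := ∀ (text : String) (keywords : List String), Dom_remove_line_and_above text keywords → Spec_remove_line_and_above text keywords (remove_line_and_above text keywords)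

-- ===== LEMMAS AND PROOFS =====

-- membership in A's removal set: exactly the x with 0 <= x <= start + j for some matching line j
theorem mem_buildSet (kw : String) (ls : List String) (s0 : PySem.Set Int)
    (start : Int) (h : 0 ≤ start) (x : Int) :
    x ∈ (PySem.List.enumerate ls start).foldl (fun s p =>
      if PySem.Str.isIn kw p.2 then
        if p.1 > 0 then s.update (PySem.List.pyRange 0 (p.1 + 1))
        else s.add p.1
      else s) s0 ↔
    x ∈ s0 ∨ ∃ j : Nat, j < ls.length ∧ PySem.Str.isIn kw (ls.getD j "") = true ∧
      0 ≤ x ∧ x ≤ start + j := by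
  induction ls generalizing s0 start with
  | nil => simp [PySem.List.enumerate]
  | cons l ls ih =>
      rw [PySem.List.enumerate_cons]
      simp only [List.foldl_cons]
      rw [ih _ _ (by omega)]
      have hhead : x ∈ (if PySem.Str.isIn kw l then
            if start > 0 then s0.update (PySem.List.pyRange 0 (start + 1))
            else s0.add start
          else s0) ↔
          x ∈ s0 ∨ (PySem.Str.isIn kw l = true ∧ 0 ≤ x ∧ x ≤ start) := by
        by_cases hm : PySem.Str.isIn kw l = true <;>
        by_cases hs : start > 0 <;>
          simp only [hm, Bool.not_eq_true] at * <;>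
          simp [hs, PySem.Set.mem_update, PySem.Set.mem_add, PySem.List.mem_pyRange_one]
        have h0 : start = 0 := by omega
        subst h0
        constructor <;> rintro (h1 | h2)
        · exact Or.inl h1
        · exact Or.inr (by omega)
        · exact Or.inl h1
        · exact Or.inr (by omega)
      rw [hhead]
      constructor
      · rintro ((h1 | ⟨hm, hx0, hx1⟩) | ⟨j, hj, hm, hx0, hx1⟩)
        · exact Or.inl h1
        · exact Or.inr ⟨0, by simp, by simpa using hm, hx0, by push_cast; omega⟩
        · exact Or.inr ⟨j + 1, by simp only [List.length_cons]; omega,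
            by simpa using hm, hx0, by push_cast at hx1 ⊢; omega⟩
      · rintro (h1 | ⟨j, hj, hm, hx0, hx1⟩)
        · exact Or.inl (Or.inl h1)
        · cases j with
          | zero =>
              exact Or.inl (Or.inr ⟨by simpa using hm, hx0, by push_cast at hx1; omega⟩)
          | succ k =>
              exact Or.inr ⟨k, by simp only [List.length_cons] at hj; omega,
                by simpa using hm, hx0, by push_cast at hx1 ⊢; omega⟩

-- A's index-filter comprehension as a filter
theorem foldl_filter_if {α : Type} (c : Int × α → Bool) (l : List (Int × α)) :
    l.foldl (fun acc p => if c p then acc else acc ++ [p.2]) ([] : List α) =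
      (l.filter (fun p => !c p)).map (·.2) := by
  calc l.foldl (fun acc p => if c p then acc else acc ++ [p.2]) []
      = l.foldl (fun acc p => if !c p then acc ++ [p.2] else acc) [] := by
        refine List.foldl_ext _ _ _ (fun acc p _ => ?_)
        by_cases h : c p = true <;> simp [h]
    _ = (l.filter (fun p => !c p)).map (·.2) := by
        simpa using PySem.List.foldl_append_if (fun p => !c p) (·.2) l []

-- a filter on enumerate that keeps only indices > M is a drop
theorem filter_enumerate_drop {α : Type} (M : Int) :
    ∀ (ls : List α) (s : Int), 0 ≤ s →
    ((PySem.List.enumerate ls s).filter (fun p => !decide (0 ≤ p.1 ∧ p.1 ≤ M))).map (·.2) =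
      ls.drop (M + 1 - s).toNat := by
  intro ls
  induction ls with
  | nil => intro s _; simp [PySem.List.enumerate]
  | cons l ls ih =>
      intro s hs
      rw [PySem.List.enumerate_cons]
      by_cases hM : M < s
      · rw [List.filter_cons_of_pos
          (by simp only [Bool.not_eq_true', decide_eq_false_iff_not]; intro hc; omega),
          List.map_cons, ih (s + 1) (by omega)]
        have h1 : (M + 1 - s).toNat = 0 := by omega
        have h2 : (M + 1 - (s + 1)).toNat = 0 := by omega
        rw [h1, h2]; simp
      · rw [List.filter_cons_of_neg (by simp; omega), ih (s + 1) (by omega)]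
        have h1 : (M + 1 - s).toNat = (M + 1 - (s + 1)).toNat + 1 := by omega
        rw [h1, List.drop_succ_cons]

-- pvFirstMatch: none iff no line matches
theorem pvFirstMatch_none (kw : String) (ls : List String) :
    pvFirstMatch kw ls = none ↔ ∀ l ∈ ls, PySem.Str.isIn kw l = false := by
  induction ls with
  | nil => simp [pvFirstMatch]
  | cons l ls ih =>
      by_cases h : PySem.Chars.isIn kw.toList l.toList = true
      · simp [pvFirstMatch, h]
      · simp only [Bool.not_eq_true] at h
        simp [pvFirstMatch, h, ih]

-- pvFirstMatch: some k means line k matches and no earlier line does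
theorem pvFirstMatch_some (kw : String) (ls : List String) (k : Nat)
    (h : pvFirstMatch kw ls = some k) :
    k < ls.length ∧ PySem.Str.isIn kw (ls.getD k "") = true ∧
      ∀ j < k, PySem.Str.isIn kw (ls.getD j "") = false := by
  induction ls generalizing k with
  | nil => simp [pvFirstMatch] at h
  | cons l ls ih =>
      by_cases hm : PySem.Chars.isIn kw.toList l.toList = true
      · simp [pvFirstMatch, hm] at h
        subst h
        exact ⟨by simp, by simpa using hm, by omega⟩
      · simp only [Bool.not_eq_true] at hm
        simp only [pvFirstMatch, PySem.Str.isIn_eq, hm, Bool.false_eq_true, if_false, Option.map_eq_some_iff] at h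
        obtain ⟨k', hk', rfl⟩ := h
        obtain ⟨h1, h2, h3⟩ := ih k' hk'
        refine ⟨by simp only [List.length_cons]; omega, by simpa using h2, ?_⟩
        intro j hj
        cases j with
        | zero => simpa using hm
        | succ j' => simpa using h3 j' (by omega)

-- per-keyword loop bodies agree
theorem step_eq (lines : List String) (kw : String) : pvStepA lines kw = pvStepB lines kw := by
  unfold pvStepA pvStepB
  rw [foldl_filter_if]
  have hmem : ∀ x : Int,
      x ∈ ((PySem.List.enumerate lines).foldl (fun s p =>
          if PySem.Str.isIn kw p.2 then
            if p.1 > 0 then s.update (PySem.List.pyRange 0 (p.1 + 1))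
            else s.add p.1
          else s) PySem.Set.empty) ↔
        ∃ j : Nat, j < lines.length ∧ PySem.Str.isIn kw (lines.getD j "") = true ∧
          0 ≤ x ∧ x ≤ (j : Int) := by
    intro x
    rw [mem_buildSet kw lines PySem.Set.empty 0 le_rfl x]
    simp [PySem.Set.empty]
  cases hfm : pvFirstMatch kw lines.reverse with
  | none =>
      rw [pvFirstMatch_none] at hfm
      have hnone : ∀ j : Nat, j < lines.length → PySem.Str.isIn kw (lines.getD j "") = false := by
        intro j hj
        have hmm : lines.getD j "" ∈ lines := by
          rw [List.getD_eq_getElem lines "" hj]; exact List.getElem_mem hj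
        exact hfm _ (List.mem_reverse.mpr hmm)
      have hcon : ∀ p : Int × String, p ∈ PySem.List.enumerate lines →
          (!PySem.Set.contains ((PySem.List.enumerate lines).foldl (fun s p =>
            if PySem.Str.isIn kw p.2 then
              if p.1 > 0 then s.update (PySem.List.pyRange 0 (p.1 + 1))
              else s.add p.1
            else s) PySem.Set.empty) p.1) = true := by
        intro p _
        simp only [Bool.not_eq_true', ← Bool.not_eq_true, PySem.Set.contains_iff]
        rw [hmem p.1]
        rintro ⟨j, hj, hm, _⟩
        simp only [hnone j hj] at hm
        exact Bool.false_ne_true hm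
      rw [List.filter_eq_self.mpr hcon, PySem.List.map_snd_enumerate]
  | some back =>
      obtain ⟨hk, hmatch, hbefore⟩ := pvFirstMatch_some kw lines.reverse back hfm
      rw [List.length_reverse] at hk
      have hrev : ∀ j : Nat, j < lines.length →
          lines.reverse.getD j "" = lines.getD (lines.length - 1 - j) "" := by
        intro j hj
        rw [List.getD_eq_getElem _ "" (by simpa using hj),
            List.getD_eq_getElem _ "" (by omega), List.getElem_reverse]
      have hM : PySem.Str.isIn kw (lines.getD (lines.length - 1 - back) "") = true := by
        rw [← hrev back hk]; exact hmatch
      have hafter : ∀ j : Nat, j < lines.length → lines.length - 1 - back < j →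
          PySem.Str.isIn kw (lines.getD j "") = false := by
        intro j hj hgt
        have hb := hbefore (lines.length - 1 - j) (by omega)
        rwa [hrev (lines.length - 1 - j) (by omega),
          show lines.length - 1 - (lines.length - 1 - j) = j by omega] at hb
      have hx : ∀ x : Int,
          PySem.Set.contains ((PySem.List.enumerate lines).foldl (fun s p =>
            if PySem.Str.isIn kw p.2 then
              if p.1 > 0 then s.update (PySem.List.pyRange 0 (p.1 + 1))
              else s.add p.1
            else s) PySem.Set.empty) x
          = decide (0 ≤ x ∧ x ≤ ((lines.length - 1 - back : Nat) : Int)) := by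
        intro x
        rw [Bool.eq_iff_iff, PySem.Set.contains_iff, decide_eq_true_eq, hmem x]
        constructor
        · rintro ⟨j, hj, hmj, hx0, hx1⟩
          have hjle : j ≤ lines.length - 1 - back := by
            by_contra hc
            simp only [hafter j hj (by omega)] at hmj
            exact Bool.false_ne_true hmj
          exact ⟨hx0, by omega⟩
        · rintro ⟨hx0, hx1⟩
          exact ⟨lines.length - 1 - back, by omega, hM, hx0, hx1⟩
      rw [List.filter_congr (fun p _ => by rw [hx p.1])]
      rw [filter_enumerate_drop _ lines 0 le_rfl]
      congr 1
      omega

-- ===== VERDICT (by name: the statement is the Claim_ definition above) =====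
theorem remove_line_and_above_spec : Claim_equal_remove_line_and_above := by
  intro text keywords _
  unfold Spec_remove_line_and_above remove_line_and_above remove_line_and_above_alt
  exact congrArg (PySem.Str.join "\n")
    (List.foldl_ext pvStepA pvStepB _ (fun acc kw _ => step_eq acc kw))
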